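-- pv_equiv track=rewrite | github.com/Kyle-fang/Dynamic-Scheduling-Strategy-For-Intelligent-RGV | Funation.py | GetMinIndex
-- ===== SOURCE A (Python) =====
-- def GetMinIndex(List):
--     Min = [0] * len(List)
--     MIN = [0, 0]
--     for i in range(len(List)):
--         Min[i] = min(List[i])
--     MIN[0] = Min.index(min(Min))
--     MIN[1] = List[MIN[0]].index(min(List[MIN[0]]))
--     return MIN
-- ===== SOURCE B (Python) =====
-- def GetMinIndex(List):
--     best = None
--     MIN = None
--     for i, row in enumerate(List):
--         m = min(row)
--         if best is None or m < best:
--             best = m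
--             MIN = [i, row.index(m)]
--     return MIN
-- ===== Notes on version B (the rewrite author's own statement) =====
-- stated objective: simpler
-- what changed: Replaces A's three separate passes (build a per-row minima list, scan it with min+index, re-scan the chosen row) by one linear scan over enumerate(List) that keeps the running best value and its [row, col] index; strict < preserves first-occurrence tie-breaking.
import Mathlib
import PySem

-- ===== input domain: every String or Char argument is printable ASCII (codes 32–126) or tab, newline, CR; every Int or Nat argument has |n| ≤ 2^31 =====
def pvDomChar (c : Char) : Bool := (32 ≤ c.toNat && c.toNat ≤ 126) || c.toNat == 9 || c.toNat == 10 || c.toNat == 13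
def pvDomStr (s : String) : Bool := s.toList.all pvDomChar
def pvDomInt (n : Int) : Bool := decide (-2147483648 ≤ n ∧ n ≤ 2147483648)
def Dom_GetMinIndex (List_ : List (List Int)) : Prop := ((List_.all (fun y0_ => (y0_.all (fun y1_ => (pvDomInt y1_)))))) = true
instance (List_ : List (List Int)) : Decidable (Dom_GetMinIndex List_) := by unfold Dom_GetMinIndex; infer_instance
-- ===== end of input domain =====

-- B is a single scan over enumerate(List) keeping the running best value and its [row, col] index,
-- instead of A's minima list plus min/index/re-scan passes; objective: simpler (same asymptotic cost).

-- ===== PORT A =====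
def GetMinIndex (List_ : List (List Int)) : List Int :=
  -- Min = [0] * len(List); for i in range(len(List)): Min[i] = min(List[i])
  let Min : List Int :=
    (PySem.List.pyRange 0 List_.length 1).foldl
      (fun acc i =>
        PySem.List.pySetD acc i
          ((PySem.List.min? ((PySem.List.pyGet? List_ i).getD []) (fun x => x)).getD 0))
      (PySem.List.pyRepeat [0] List_.length)
  -- MIN[0] = Min.index(min(Min))
  let i0 : Int := (((PySem.List.index? Min ((PySem.List.min? Min (fun x => x)).getD 0)).getD 0 : Nat) : Int)
  -- MIN[1] = List[MIN[0]].index(min(List[MIN[0]]))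
  let row : List Int := (PySem.List.pyGet? List_ i0).getD []
  let j0 : Int := (((PySem.List.index? row ((PySem.List.min? row (fun x => x)).getD 0)).getD 0 : Nat) : Int)
  [i0, j0]

-- ===== PORT B =====
def GetMinIndex_alt (List_ : List (List Int)) : List Int :=
  -- single scan: best = None; MIN = None; for i, row in enumerate(List): ...
  let st : Option Int × Option (List Int) :=
    (PySem.List.enumerate List_ 0).foldl
      (fun st p =>
        let m : Int := (PySem.List.min? p.2 (fun x => x)).getD 0
        match st.1 with
        | none => (some m, some [p.1, (((PySem.List.index? p.2 m).getD 0 : Nat) : Int)])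
        | some b =>
          if m < b then (some m, some [p.1, (((PySem.List.index? p.2 m).getD 0 : Nat) : Int)])
          else st)
      (none, none)
  -- Python returns MIN (None when the list is empty — outside Pre_); [] stands in for the impossible None
  st.2.getD []

-- ===== PRECONDITION & SPEC =====
-- Pre_ excludes exactly the inputs where A raises ValueError: the empty outer list (min of the
-- empty minima list) and any input containing an empty row (min of an empty row).
def Pre_GetMinIndex (List_ : List (List Int)) : Prop :=
  List_ ≠ [] ∧ ∀ row ∈ List_, row ≠ []
instance (List_ : List (List Int)) : Decidable (Pre_GetMinIndex List_) := by
  unfold Pre_GetMinIndex; infer_instance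
def pvWitness_GetMinIndex : List (List Int) := [[3, 1], [2, 1]]

def Spec_GetMinIndex (List_ : List (List Int)) (out : List Int) : Prop := out = GetMinIndex_alt List_
instance (List_ : List (List Int)) (out : List Int) : Decidable (Spec_GetMinIndex List_ out) := by
  unfold Spec_GetMinIndex; infer_instance

-- ===== CLAIM (what is proved, stated in full; the proofs are below) =====
def Claim_equal_GetMinIndex : Prop :=
  ∀ (List_ : List (List Int)), Dom_GetMinIndex List_ → Pre_GetMinIndex List_ →
    Spec_GetMinIndex List_ (GetMinIndex List_)

-- ===== LEMMAS AND PROOFS =====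

def pvRm (row : List Int) : Int := (PySem.List.min? row (fun x => x)).getD 0

theorem pvFillAux (L : List (List Int)) (k : Nat) (acc : List Int) (h : acc.length = L.length) :
    (PySem.List.pyRange (k : Int) L.length 1).foldl
      (fun acc i =>
        PySem.List.pySetD acc i
          ((PySem.List.min? ((PySem.List.pyGet? L i).getD []) (fun x => x)).getD 0))
      acc
    = acc.take k ++ (L.drop k).map pvRm := by
  by_cases hk : k < L.length
  · rw [PySem.List.pyRange_one_cons (by exact_mod_cast hk)]
    simp only [List.foldl_cons]
    rw [PySem.List.pySetD_natCast, PySem.List.pyGet?_natCast, List.getElem?_eq_getElem hk]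
    have : ((k : Int) + 1) = ((k + 1 : Nat) : Int) := by push_cast; ring
    rw [this, pvFillAux L (k+1) _ (by simpa using h)]
    rw [List.drop_eq_getElem_cons hk, List.take_set]
    have hkacc : k < acc.length := h ▸ hk
    rw [List.take_succ, List.getElem?_eq_getElem hkacc]
    have : (acc.take k ++ [acc[k]]).set k ((PySem.List.min? L[k] (fun x => x)).getD 0)
         = acc.take k ++ [(PySem.List.min? L[k] (fun x => x)).getD 0] := by
      rw [List.set_append_right _ _ (by simp [Nat.min_eq_left hkacc.le])]
      simp [Nat.min_eq_left hkacc.le]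
    simp only [Option.toList_some, Option.getD_some, List.map_cons]
    rw [this]
    simp [pvRm]
  · rw [PySem.List.pyRange_one_eq_nil (by exact_mod_cast Nat.le_of_not_lt hk)]
    rw [List.drop_eq_nil_of_le (Nat.le_of_not_lt hk), List.take_of_length_le (h ▸ Nat.le_of_not_lt hk)]
    simp
termination_by L.length - k

def pvInner (row : List Int) : Int :=
  (((PySem.List.index? row (pvRm row)).getD 0 : Nat) : Int)
def pvM (rows : List (List Int)) : Int :=
  (PySem.List.min? (rows.map pvRm) (fun x => x)).getD 0
def pvJ (rows : List (List Int)) : Nat :=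
  (PySem.List.index? (rows.map pvRm) (pvM rows)).getD 0

theorem pvM_some (rows : List (List Int)) (h : rows ≠ []) :
    PySem.List.min? (rows.map pvRm) (fun x => x) = some (pvM rows) := by
  have : PySem.List.min? (rows.map pvRm) (fun x => x) ≠ none := by
    intro hn
    rw [PySem.List.min?_eq_none_iff] at hn
    simp at hn
    exact h hn
  obtain ⟨m, hm⟩ := Option.ne_none_iff_exists'.mp this
  simp [pvM, hm]

theorem pvM_mem (rows : List (List Int)) (h : rows ≠ []) : pvM rows ∈ rows.map pvRm :=
  PySem.List.min?_mem (pvM_some rows h)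

theorem pvM_le (rows : List (List Int)) (h : rows ≠ []) :
    ∀ y ∈ rows.map pvRm, pvM rows ≤ y := by
  intro y hy
  exact PySem.List.min?_isMin (pvM_some rows h) y hy

theorem pvM_cons_le (r : List Int) (rest : List (List Int))
    (h : ∀ r' ∈ rest, pvRm r ≤ pvRm r') : pvM (r :: rest) = pvRm r ∧ pvJ (r :: rest) = 0 := by
  have hall : ∀ y ∈ (r :: rest).map pvRm, pvRm r ≤ y := by
    intro y hy
    simp only [List.map_cons, List.mem_cons, List.mem_map] at hy
    rcases hy with rfl | ⟨r', hr', rfl⟩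
    · exact le_refl _
    · exact h r' hr'
  have hM : pvM (r :: rest) = pvRm r := by
    have h1 := pvM_le (r :: rest) (by simp) _ (by simp : pvRm r ∈ (r :: rest).map pvRm)
    have h2 := hall _ (pvM_mem (r :: rest) (by simp))
    omega
  refine ⟨hM, ?_⟩
  rw [pvJ, List.map_cons, hM, PySem.List.index?_cons_self]
  rfl

theorem pvM_cons_lt (r : List Int) (rest : List (List Int))
    (h : ∃ r' ∈ rest, pvRm r' < pvRm r) :
    pvM (r :: rest) = pvM rest ∧ pvJ (r :: rest) = pvJ rest + 1 := by
  obtain ⟨r', hr', hlt⟩ := h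
  have hrest : rest ≠ [] := by rintro rfl; simp at hr'
  have hMr : pvM rest < pvRm r :=
    lt_of_le_of_lt (pvM_le rest hrest _ (by exact List.mem_map_of_mem hr')) hlt
  have hM : pvM (r :: rest) = pvM rest := by
    have h1 := pvM_le (r :: rest) (by simp) (pvM rest)
      (by simp only [List.map_cons]; exact List.mem_cons_of_mem _ (pvM_mem rest hrest))
    have h2 : pvM (r :: rest) ∈ pvRm r :: rest.map pvRm := by
      simpa using pvM_mem (r :: rest) (by simp)
    rcases List.mem_cons.mp h2 with heq | hmem
    · omega
    · have := pvM_le rest hrest _ hmem; omega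
  refine ⟨hM, ?_⟩
  have hne : pvRm r ≠ pvM (r :: rest) := by omega
  rw [pvJ, List.map_cons, PySem.List.index?_cons_of_ne _ hne, hM]
  obtain ⟨j, hj⟩ := Option.isSome_iff_exists.mp
    ((PySem.List.index?_isSome_iff (xs := rest.map pvRm) (v := pvM rest)).mpr
      (pvM_mem rest hrest))
  rw [hj]
  rw [PySem.List.index?_eq_idxOf?] at hj
  simp [pvJ, PySem.List.index?_eq_idxOf?, hj]

theorem pvBfold (rows : List (List Int)) (k b : Int) (cur : List Int) :
    (PySem.List.enumerate rows k).foldl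
      (fun st p =>
        let m : Int := (PySem.List.min? p.2 (fun x => x)).getD 0
        match st.1 with
        | none => (some m, some [p.1, (((PySem.List.index? p.2 m).getD 0 : Nat) : Int)])
        | some b =>
          if m < b then (some m, some [p.1, (((PySem.List.index? p.2 m).getD 0 : Nat) : Int)])
          else st)
      ((some b, some cur) : Option Int × Option (List Int))
    = if ∀ r ∈ rows, b ≤ pvRm r then (some b, some cur)
      else (some (pvM rows), some [k + (pvJ rows : Int), pvInner (rows.getD (pvJ rows) [])]) := by
  induction rows generalizing k b cur with
  | nil => simp
  | cons r rest ih =>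
    rw [PySem.List.enumerate_cons, List.foldl_cons]
    by_cases hlt : (PySem.List.min? r (fun x => x)).getD 0 < b
    · simp only [hlt, if_pos]
      rw [ih]
      have hnot : ¬ ∀ r' ∈ r :: rest, b ≤ pvRm r' := by
        intro hall
        have := hall r (by simp)
        simp only [pvRm] at this
        omega
      rw [if_neg hnot]
      by_cases hall : ∀ r' ∈ rest, pvRm r ≤ pvRm r'
      · have hall' : ∀ r' ∈ rest, (PySem.List.min? r (fun x => x)).getD 0 ≤ pvRm r' := hall
        rw [if_pos hall']
        obtain ⟨hM, hJ⟩ := pvM_cons_le r rest hall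
        simp [hM, hJ, pvRm, pvInner]
      · push_neg at hall
        have hex : ∃ r' ∈ rest, pvRm r' < pvRm r := by
          obtain ⟨r', hr', hlt'⟩ := hall
          exact ⟨r', hr', hlt'⟩
        rw [if_neg (by push_neg; obtain ⟨r', h1, h2⟩ := hex; exact ⟨r', h1, by simpa [pvRm] using h2⟩)]
        obtain ⟨hM, hJ⟩ := pvM_cons_lt r rest hex
        rw [hM, hJ, List.getD_cons_succ]
        simp only [Nat.cast_add, Nat.cast_one]
        ring_nf
    · simp only [hlt, if_neg, ite_false]
      rw [ih]
      have hble : b ≤ pvRm r := by simp only [pvRm]; omega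
      by_cases hall : ∀ r' ∈ rest, b ≤ pvRm r'
      · have hall2 : ∀ r' ∈ r :: rest, b ≤ pvRm r' := by
          intro r' hr'
          rcases List.mem_cons.mp hr' with rfl | h
          · exact hble
          · exact hall r' h
        rw [if_pos hall, if_pos hall2]
      · have hall2 : ¬ ∀ r' ∈ r :: rest, b ≤ pvRm r' := fun hc =>
          hall (fun r' hr' => hc r' (List.mem_cons_of_mem _ hr'))
        rw [if_neg hall, if_neg hall2]
        have hex : ∃ r' ∈ rest, pvRm r' < pvRm r := by
          push_neg at hall
          obtain ⟨r', hr', hlt'⟩ := hall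
          exact ⟨r', hr', by omega⟩
        obtain ⟨hM, hJ⟩ := pvM_cons_lt r rest hex
        rw [hM, hJ, List.getD_cons_succ]
        simp only [Nat.cast_add, Nat.cast_one]
        ring_nf

theorem pvJ_lt (rows : List (List Int)) (h : rows ≠ []) : pvJ rows < rows.length := by
  obtain ⟨j, hj⟩ := Option.isSome_iff_exists.mp
    ((PySem.List.index?_isSome_iff (xs := rows.map pvRm) (v := pvM rows)).mpr (pvM_mem rows h))
  obtain ⟨hlt, -, -⟩ := PySem.List.getElem_of_index?_eq_some hj
  have : pvJ rows = j := by
    rw [PySem.List.index?_eq_idxOf?] at hj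
    simp [pvJ, PySem.List.index?_eq_idxOf?, hj]
  rw [this]
  simpa using hlt

theorem pvA_eq (L : List (List Int)) (h : L ≠ []) :
    GetMinIndex L = [((pvJ L : Nat) : Int), pvInner (L.getD (pvJ L) [])] := by
  unfold GetMinIndex
  have hfill := pvFillAux L 0 (PySem.List.pyRepeat [0] L.length)
    (by rw [PySem.List.pyRepeat_singleton]; simp)
  simp only [Nat.cast_zero] at hfill
  rw [hfill]
  simp only [List.take_zero, List.drop_zero, List.nil_append]
  have hJ : ((PySem.List.index? (L.map pvRm)
      ((PySem.List.min? (L.map pvRm) (fun x => x)).getD 0)).getD 0) = pvJ L := rfl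
  rw [hJ]
  have hget : (PySem.List.pyGet? L ((pvJ L : Nat) : Int)).getD [] = L.getD (pvJ L) [] := by
    rw [PySem.List.pyGet?_natCast, List.getElem?_eq_getElem (pvJ_lt L h),
      Option.getD_some, List.getD_eq_getElem L [] (pvJ_lt L h)]
  rw [hget]
  rfl

theorem pvMain (L : List (List Int)) (h : L ≠ []) : GetMinIndex L = GetMinIndex_alt L := by
  obtain ⟨r, rest, rfl⟩ := List.exists_cons_of_ne_nil h
  rw [pvA_eq _ h]
  unfold GetMinIndex_alt
  rw [PySem.List.enumerate_cons, List.foldl_cons]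
  simp only []
  rw [show (0 : Int) + 1 = 1 from rfl]
  rw [pvBfold rest 1 ((PySem.List.min? r (fun x => x)).getD 0)
      [0, (((PySem.List.index? r ((PySem.List.min? r (fun x => x)).getD 0)).getD 0 : Nat) : Int)]]
  by_cases hall : ∀ r' ∈ rest, pvRm r ≤ pvRm r'
  · have hall' : ∀ r' ∈ rest, (PySem.List.min? r (fun x => x)).getD 0 ≤ pvRm r' := hall
    rw [if_pos hall']
    obtain ⟨hM, hJ⟩ := pvM_cons_le r rest hall
    simp [hJ, pvInner, pvRm]
  · push_neg at hall
    have hex : ∃ r' ∈ rest, pvRm r' < pvRm r := hall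
    rw [if_neg (by push_neg; obtain ⟨r', h1, h2⟩ := hex; exact ⟨r', h1, by simpa [pvRm] using h2⟩)]
    obtain ⟨hM, hJ⟩ := pvM_cons_lt r rest hex
    rw [hJ, List.getD_cons_succ]
    simp only [Option.getD_some, Nat.cast_add, Nat.cast_one]
    ring_nf

-- ===== VERDICT (by name: the statement is the Claim_ definition above) =====
theorem GetMinIndex_spec : Claim_equal_GetMinIndex := by
  intro List_ _ hpre
  unfold Spec_GetMinIndex
  exact pvMain List_ hpre.1
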